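-- pv_equiv track=rewrite | github.com/mansh2060/SHA-512 | text_to_padding.py | one_two_eight_bit_add
-- ===== SOURCE A (Python) =====
-- def one_two_eight_bit_add(text):
--     bits_list = []
--     reversed_bits_list = []
--     zero_list = []
--     bits_value = len(text) * 8
--     while bits_value != 0:
--         rem = bits_value % 2
--         bits_list.append(rem)
--         bits_value = bits_value // 2
--     for i in range(len(bits_list)-1,-1,-1):
--         reversed_bits_list.append(bits_list[i])
--     zero_add_length = 128 - len(reversed_bits_list)
--     for _ in range(zero_add_length):
--         zero_list.append(0)
--     concatenate_list = zero_list + reversed_bits_list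
--     return concatenate_list
-- ===== SOURCE B (Python) =====
-- def one_two_eight_bit_add(text):
--     return [int(c) for c in format(len(text) * 8, '0128b')]
-- ===== Notes on version B (the rewrite author's own statement) =====
-- stated objective: simpler
-- what changed: Replaces the little-endian mod/div loop, the explicit index-based reversal pass and the separate zero-padding loop with a single big-endian binary formatting of len(text)*8, zero-padded to a minimum width of 128.
import Mathlib
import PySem

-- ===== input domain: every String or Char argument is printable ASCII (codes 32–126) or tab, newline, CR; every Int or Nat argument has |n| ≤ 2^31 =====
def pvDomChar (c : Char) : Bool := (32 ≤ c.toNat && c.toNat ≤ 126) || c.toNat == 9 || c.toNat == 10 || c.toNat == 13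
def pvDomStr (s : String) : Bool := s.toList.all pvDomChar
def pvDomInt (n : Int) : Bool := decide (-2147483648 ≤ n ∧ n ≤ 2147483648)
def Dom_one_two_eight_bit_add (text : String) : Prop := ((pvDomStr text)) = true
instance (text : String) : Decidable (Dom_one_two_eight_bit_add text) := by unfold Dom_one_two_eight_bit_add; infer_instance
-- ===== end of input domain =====

-- B replaces A's little-endian mod/div loop + index reversal + zero-padding loop by one
-- big-endian zero-padded binary formatting pass (format(n, '0128b')); objective: simpler.

-- ===== PORT A =====
-- while bits_value != 0: append bits_value % 2; bits_value //= 2   (bits_value = len(text)*8 ≥ 0,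
-- so Python's % and // on it coincide with Nat.mod/Nat.div; little-endian list of bits)
def pvAWhileBits (n : Nat) : List Int :=
  if h : n = 0 then []
  else ((n % 2 : Nat) : Int) :: pvAWhileBits (n / 2)
decreasing_by exact Nat.div_lt_self (Nat.pos_of_ne_zero h) one_lt_two

def one_two_eight_bit_add (text : String) : List Int :=
  -- bits_value = len(text) * 8 ; PySem.Str.len text ≥ 0 so .toNat is exact
  let bits_list := pvAWhileBits ((PySem.Str.len text).toNat * 8)
  -- for i in range(len(bits_list)-1, -1, -1): reversed_bits_list.append(bits_list[i])
  let reversed_bits_list :=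
    (PySem.List.pyRange ((bits_list.length : Int) - 1) (-1) (-1)).foldl
      (fun acc i => acc ++ [PySem.List.pyGetD bits_list i 0]) []
  let zero_add_length : Int := 128 - (reversed_bits_list.length : Int)
  -- for _ in range(zero_add_length): zero_list.append(0)
  let zero_list :=
    (PySem.List.pyRange 0 zero_add_length 1).foldl (fun acc _ => acc ++ [(0 : Int)]) []
  zero_list ++ reversed_bits_list

-- ===== PORT B =====
-- big-endian binary digits of n (empty for 0); 'bin' part of format(n, 'b')
def pvBinMSB (n : Nat) : List Int :=
  if h : n = 0 then []
  else pvBinMSB (n / 2) ++ [((n % 2 : Nat) : Int)]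
decreasing_by exact Nat.div_lt_self (Nat.pos_of_ne_zero h) one_lt_two

-- format(n, '0128b') as a digit list: binary repr ("0" for 0) left-padded with zeros to width 128
def pvFormat0128b (n : Nat) : List Int :=
  let s := if n = 0 then [(0 : Int)] else pvBinMSB n
  List.replicate (128 - s.length) 0 ++ s

def one_two_eight_bit_add_alt (text : String) : List Int :=
  pvFormat0128b ((PySem.Str.len text).toNat * 8)

-- ===== PRECONDITION & SPEC =====
def Spec_one_two_eight_bit_add (text : String) (out : List Int) : Prop := out = one_two_eight_bit_add_alt text
instance (text : String) (out : List Int) : Decidable (Spec_one_two_eight_bit_add text out) := by unfold Spec_one_two_eight_bit_add; infer_instance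

-- ===== CLAIM (what is proved, stated in full; the proofs are below) =====
def Claim_equal_one_two_eight_bit_add : Prop := ∀ (text : String), Dom_one_two_eight_bit_add text → Spec_one_two_eight_bit_add text (one_two_eight_bit_add text)

-- ===== LEMMAS AND PROOFS =====

-- A's index-descending copy loop is reversal
theorem pvLoopRev (xs : List Int) :
    (PySem.List.pyRange ((xs.length : Int) - 1) (-1) (-1)).foldl
      (fun acc i => acc ++ [PySem.List.pyGetD xs i 0]) [] = xs.reverse := by
  rw [PySem.List.foldl_append_singleton_eq_map, PySem.List.pyRange_neg_one_eq_reverse]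
  have h : ((-1 : Int) + 1) = 0 := by ring
  have h2 : ((xs.length : Int) - 1) + 1 = (xs.length : Int) := by ring
  rw [h, h2, List.map_reverse, PySem.List.map_pyGetD_pyRange_zero']
  simp

-- A's zero-appending loop builds a replicate
theorem pvLoopZeros (z : Int) :
    (PySem.List.pyRange 0 z 1).foldl (fun acc _ => acc ++ [(0 : Int)]) [] =
      List.replicate z.toNat 0 := by
  rw [show (fun (acc : List Int) (_ : Int) => acc ++ [(0 : Int)]) =
        (fun acc x => acc ++ [(fun _ => (0 : Int)) x]) from rfl,
      PySem.List.foldl_append_singleton_eq_map]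
  rw [List.map_const', PySem.List.length_pyRange_one]
  simp

-- reversing A's little-endian bits gives B's big-endian bits
theorem pvRevBits (n : Nat) : (pvAWhileBits n).reverse = pvBinMSB n := by
  induction n using Nat.strong_induction_on with
  | _ n ih =>
    rw [pvAWhileBits, pvBinMSB]
    split_ifs with h
    · simp
    · rw [List.reverse_cons, ih (n / 2) (Nat.div_lt_self (Nat.pos_of_ne_zero h) one_lt_two)]

theorem pvMainEq (n : Nat) :
    (PySem.List.pyRange 0 (128 - ((pvAWhileBits n).reverse.length : Int)) 1).foldl
        (fun acc _ => acc ++ [(0 : Int)]) [] ++ (pvAWhileBits n).reverse =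
      pvFormat0128b n := by
  rw [pvLoopZeros, pvRevBits, pvFormat0128b]
  by_cases h : n = 0
  · subst h
    rw [show pvBinMSB 0 = [] from by rw [pvBinMSB]; simp]
    decide
  · simp only [if_neg h]
    congr 1
    congr 1
    omega

-- ===== VERDICT (by name: the statement is the Claim_ definition above) =====
theorem one_two_eight_bit_add_spec : Claim_equal_one_two_eight_bit_add := by
  intro text _
  unfold Spec_one_two_eight_bit_add one_two_eight_bit_add one_two_eight_bit_add_alt
  simp only [pvLoopRev]
  exact pvMainEq ((PySem.Str.len text).toNat * 8)
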